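-- pv_equiv track=rewrite | github.com/margotphoenix/curly-brackets | curlybrackets/utilities.py | seeds_to_sequential
-- ===== SOURCE A (Python) =====
-- def seed_order(size):
--     order = [1]
--     while len(order) < size:
--         new_order = []
--         L = len(order)*2+1
--         for j in order:
--             new_order.append(j)
--             new_order.append(L-j)
--         order = new_order
--     return order
--
-- def reverse_seed_map(size):
--     order = seed_order(size)
--     sorted_order, reverse_map = zip(*sorted(zip(order, range(len(order)))))
--     return list(reverse_map)
--
-- def seeds_to_sequential(seed_list, size=None, fill=''):
--     if size is None:
--         rmap = reverse_seed_map(len(seed_list))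
--     else:
--         rmap = reverse_seed_map(size)
--     if callable(fill):
--         fill_fn = fill
--     else:
--         def fill_fn(x): return fill
--     fill_list = [fill_fn(i+1) for i in range(len(rmap)-len(seed_list))]
--     filled_list = list(seed_list) + fill_list
--     sorted_order, seq_list = zip(*sorted(zip(rmap, filled_list)))
--     seq_list = type(seed_list)(seq_list)
--     return seq_list
-- ===== SOURCE B (Python) =====
-- def seeds_to_sequential(seed_list, size=None, fill=''):
--     # Top-down recursive placement: peel the bracket's doubling structure from
--     # the outside in, building the sequential list directly without constructing
--     # the seed order, the reverse map, or sorting.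
--     n = len(seed_list) if size is None else size
--     if callable(fill):
--         fill_fn = fill
--     else:
--         def fill_fn(x): return fill
--     m = len(seed_list)
--
--     def pick(j):
--         return seed_list[j - 1] if j - 1 < m else fill_fn(j - m)
--
--     def depth(N):
--         return 0 if N >= n else 1 + depth(2 * N)
--
--     def place(k, f):
--         if k == 0:
--             return f(1)
--         top = 2 ** k + 1
--         return place(k - 1, lambda j: f(j) + f(top - j))
--
--     return type(seed_list)(place(depth(1), lambda j: [pick(j)]))
-- ===== Notes on version B (the rewrite author's own statement) =====
-- stated objective: alternative
-- what changed: B never builds the seed order, the reverse map or any sorted list: it recursively peels the bracket's doubling structure from the outside in (place(k,f) -> place(k-1, j -> f(j)+f(2^k+1-j))), emitting the sequential list directly.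
import Mathlib
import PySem

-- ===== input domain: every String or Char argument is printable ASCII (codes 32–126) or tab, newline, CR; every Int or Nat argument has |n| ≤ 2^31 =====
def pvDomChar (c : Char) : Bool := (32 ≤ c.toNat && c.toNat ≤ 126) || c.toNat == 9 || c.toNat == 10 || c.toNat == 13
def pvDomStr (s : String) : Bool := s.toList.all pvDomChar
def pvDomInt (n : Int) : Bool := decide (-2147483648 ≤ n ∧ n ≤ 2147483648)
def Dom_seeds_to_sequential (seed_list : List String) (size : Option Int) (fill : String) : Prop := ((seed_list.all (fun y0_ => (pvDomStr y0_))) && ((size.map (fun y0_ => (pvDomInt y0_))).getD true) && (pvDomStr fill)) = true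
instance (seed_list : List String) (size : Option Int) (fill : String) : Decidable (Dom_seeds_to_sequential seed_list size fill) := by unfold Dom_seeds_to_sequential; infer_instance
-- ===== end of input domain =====

-- B replaces A's seed-order list, reverse map and two sorts by a top-down recursion
-- that peels the bracket's doubling structure and emits the sequential list directly.

-- ===== PORT A =====
-- termination helper for the seed_order while-loop (cited by its decreasing_by)
theorem pv_expand_length (order : List Int) (c : Int) :
    (order.foldl (fun acc j => acc ++ [j, c - j]) []).length = 2 * order.length := by
  rw [PySem.List.foldl_append_eq_flatMap (fun j => [j, c - j]) order []]
  induction order with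
  | nil => simp
  | cons x xs ih => simp_all [List.flatMap_cons]; omega

-- one pass of the while-body: new_order built by the two appends per j (L = len(order)*2+1)
def pvExpand (order : List Int) : List Int :=
  order.foldl (fun acc j => acc ++ [j, (2 * (order.length : Int) + 1) - j]) []

-- the 'while len(order) < size' loop of seed_order (order starts [1], so 0 < len is invariant)
def pvSeedLoop (size : Int) (order : List Int) (h : 0 < order.length) : List Int :=
  if hl : (order.length : Int) < size then
    pvSeedLoop size (pvExpand order) (by rw [pvExpand, pv_expand_length]; omega)
  else order
termination_by (size - order.length).toNat
decreasing_by rw [pvExpand, pv_expand_length]; omega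

def seed_order (size : Int) : List Int := pvSeedLoop size [1] (by simp)

def reverse_seed_map (size : Int) : List Int :=
  let order := seed_order size
  (PySem.List.sorted2 (order.zip (PySem.List.pyRange 0 (order.length : Int) 1)) Prod.fst Prod.snd).map Prod.snd

def seeds_to_sequential (seed_list : List String) (size : Option Int) (fill : String) : List String :=
  let rmap := reverse_seed_map (match size with | none => (seed_list.length : Int) | some s => s)
  let fill_list := (PySem.List.pyRange 0 ((rmap.length : Int) - (seed_list.length : Int)) 1).map (fun _i => fill)
  let filled_list := seed_list ++ fill_list
  (PySem.List.sorted2 (rmap.zip filled_list) Prod.fst Prod.snd).map Prod.snd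

-- ===== PORT B =====
-- Source B's depth(N): number of doublings until N >= n (always called with N ≥ 1,
-- which the proof argument records so the recursion terminates)
def pvDepth (n : Int) (N : Int) (h : 0 < N) : Nat :=
  if N ≥ n then 0 else 1 + pvDepth n (2 * N) (by omega)
termination_by (n - N).toNat
decreasing_by omega

-- Source B's place(k, f): peel the outermost doubling (top = 2^k + 1) first
def pvPlace (k : Nat) (f : Int → List String) : List String :=
  match k with
  | 0 => f 1
  | k + 1 => pvPlace k (fun j => f j ++ f (((2 : Int) ^ (k + 1) + 1) - j))

-- Source B: pick(j) = seed_list[j-1] if j-1 < m else fill; the index is always in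
-- range in its branch (1 ≤ j there), so pyGetD's default is never consulted.
def seeds_to_sequential_alt (seed_list : List String) (size : Option Int) (fill : String) : List String :=
  let n := match size with | none => (seed_list.length : Int) | some s => s
  let m := seed_list.length
  pvPlace (pvDepth n 1 (by norm_num))
    (fun j => [if j - 1 < (m : Int) then PySem.List.pyGetD seed_list (j - 1) fill else fill])

-- ===== PRECONDITION & SPEC =====
def Spec_seeds_to_sequential (seed_list : List String) (size : Option Int) (fill : String) (out : List String) : Prop := out = seeds_to_sequential_alt seed_list size fill
instance (seed_list : List String) (size : Option Int) (fill : String) (out : List String) : Decidable (Spec_seeds_to_sequential seed_list size fill out) := by unfold Spec_seeds_to_sequential; infer_instance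

-- ===== CLAIM (what is proved, stated in full; the proofs are below) =====
def Claim_equal_seeds_to_sequential : Prop := ∀ (seed_list : List String) (size : Option Int) (fill : String), Dom_seeds_to_sequential seed_list size fill → Spec_seeds_to_sequential seed_list size fill (seeds_to_sequential seed_list size fill)

-- ===== LEMMAS AND PROOFS =====

-- seed_order's loop invariant: the list is duplicate-free and holds exactly the values 1..len
theorem pvSeedLoop_inv (size : Int) (order : List Int) (h : 0 < order.length)
    (hnd : order.Nodup) (hmem : ∀ v : Int, v ∈ order ↔ 1 ≤ v ∧ v ≤ order.length) :
    (pvSeedLoop size order h).Nodup ∧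
      ∀ v : Int, v ∈ pvSeedLoop size order h ↔ 1 ≤ v ∧ v ≤ (pvSeedLoop size order h).length := by
  fun_induction pvSeedLoop size order h with
  | case1 order h hl ih =>
      apply ih
      · -- Nodup of the expanded list
        rw [pvExpand, PySem.List.foldl_append_eq_flatMap, List.nil_append, List.nodup_flatMap]
        constructor
        · intro j hj
          have := (hmem j).1 hj
          simp only [List.nodup_cons, List.mem_singleton, List.not_mem_nil, List.nodup_nil]
          constructor
          · omega
          · simp
        · rw [List.pairwise_iff_getElem]
          intro i k hi hk hik
          have hne : order[i] ≠ order[k] := fun e => absurd (List.Nodup.getElem_inj_iff hnd |>.1 e) hik.ne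
          have hbi := (hmem order[i]).1 (List.getElem_mem hi)
          have hbk := (hmem order[k]).1 (List.getElem_mem hk)
          intro x hx hx'
          simp only [List.mem_cons, List.not_mem_nil, or_false] at hx hx'
          rcases hx with rfl | rfl <;> rcases hx' with h1 | h1 <;> omega
      · -- membership of the expanded list
        intro v
        have hlen : (pvExpand order).length = 2 * order.length := by
          rw [pvExpand]; exact pv_expand_length order _
        rw [hlen, pvExpand, PySem.List.foldl_append_eq_flatMap, List.nil_append]
        simp only [List.mem_flatMap, List.mem_cons, List.not_mem_nil, or_false]
        constructor
        · rintro ⟨j, hj, hv | hv⟩ <;> (have := (hmem j).1 hj; push_cast; omega)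
        · intro hv
          by_cases hsmall : v ≤ (order.length : Int)
          · exact ⟨v, (hmem v).2 ⟨by omega, hsmall⟩, Or.inl rfl⟩
          · refine ⟨2 * (order.length : Int) + 1 - v, (hmem _).2 ⟨by push_cast at hv ⊢; omega, by push_cast at hv ⊢; omega⟩, Or.inr (by ring)⟩
  | case2 order h hl => exact ⟨hnd, hmem⟩

theorem seed_order_nodup (s : Int) : (seed_order s).Nodup :=
  (pvSeedLoop_inv s [1] (by simp) (by simp) (by intro v; simp; omega)).1

theorem seed_order_mem (s : Int) :
    ∀ v : Int, v ∈ seed_order s ↔ 1 ≤ v ∧ v ≤ (seed_order s).length :=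
  (pvSeedLoop_inv s [1] (by simp) (by simp) (by intro v; simp; omega)).2

-- index-placement facts about σ k = idxOf (k+1)
theorem pv_sigma_lt (s : Int) (k : Nat) (hk : k < (seed_order s).length) :
    (seed_order s).idxOf ((k : Int) + 1) < (seed_order s).length := by
  apply List.idxOf_lt_length_of_mem
  exact (seed_order_mem s _).2 ⟨by omega, by omega⟩

theorem pv_getElem_sigma (s : Int) (k : Nat) (hk : k < (seed_order s).length) :
    (seed_order s)[(seed_order s).idxOf ((k : Int) + 1)]'(pv_sigma_lt s k hk) = (k : Int) + 1 :=
  List.getElem_idxOf (pv_sigma_lt s k hk)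

theorem pv_sigma_getElem (s : Int) (i : Nat) (hi : i < (seed_order s).length) :
    (seed_order s).idxOf ((((seed_order s)[i] - 1).toNat : Int) + 1) = i := by
  have hb := (seed_order_mem s _).1 (List.getElem_mem hi)
  have he : ((((seed_order s)[i] - 1).toNat : Int) + 1) = (seed_order s)[i] := by omega
  rw [he]
  exact List.Nodup.idxOf_getElem (seed_order_nodup s) i hi

-- σ permutes the index range
theorem pv_perm_sigma (s : Int) :
    ((List.range (seed_order s).length).map (fun (k : Nat) => (seed_order s).idxOf ((k : Int) + 1))).Perm
      (List.range (seed_order s).length) := by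
  rw [List.perm_ext_iff_of_nodup _ (List.nodup_range)]
  · intro i
    simp only [List.mem_map, List.mem_range]
    constructor
    · rintro ⟨k, hk, rfl⟩; exact pv_sigma_lt s k hk
    · intro hi
      refine ⟨((seed_order s)[i] - 1).toNat, ?_, pv_sigma_getElem s i hi⟩
      have hb := (seed_order_mem s _).1 (List.getElem_mem hi)
      omega
  · apply List.Nodup.map_on _ List.nodup_range
    intro k hk k' hk' he
    simp only [List.mem_range] at hk hk'
    have : (seed_order s)[(seed_order s).idxOf ((k : Int) + 1)]'(pv_sigma_lt s k hk)
        = (seed_order s)[(seed_order s).idxOf ((k' : Int) + 1)]'(pv_sigma_lt s k' hk') := by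
      simp_rw [he]
    rw [pv_getElem_sigma s k hk, pv_getElem_sigma s k' hk'] at this
    omega

-- generic: insertBy only looks at comparisons with current members
theorem pv_insertBy_congr {α : Type} (f g : α → α → Bool) (x : α) (acc : List α)
    (h : ∀ b ∈ acc, f x b = g x b) : PySem.List.insertBy f x acc = PySem.List.insertBy g x acc := by
  induction acc with
  | nil => rfl
  | cons y ys ih =>
      simp only [PySem.List.insertBy]
      rw [h y (by simp)]
      split
      · rfl
      · rw [ih (fun b hb => h b (by simp [hb]))]

theorem pv_foldl_insertBy_congr {α : Type} (f g : α → α → Bool) (all : List α) :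
    ∀ (xs acc : List α), (∀ a ∈ xs, a ∈ all) → (∀ a ∈ acc, a ∈ all) →
    (∀ a ∈ all, ∀ b ∈ all, f a b = g a b) →
    xs.foldl (fun acc x => PySem.List.insertBy f x acc) acc
      = xs.foldl (fun acc x => PySem.List.insertBy g x acc) acc := by
  intro xs
  induction xs with
  | nil => intro acc _ _ _; rfl
  | cons x xs ih =>
      intro acc hxs hacc hfg
      simp only [List.foldl_cons]
      rw [pv_insertBy_congr f g x acc (fun b hb => hfg x (hxs x (by simp)) b (hacc b hb))]
      exact ih _ (fun a ha => hxs a (by simp [ha]))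
        (fun a ha => by
          rcases (PySem.List.mem_insertBy g x a acc).1 ha with rfl | ha
          · exact hxs a (by simp)
          · exact hacc a ha) hfg

-- Python sorts pairs lexicographically; with duplicate-free first components that is sorting by fst
theorem pv_sorted2_eq_sorted {β γ : Type} [LinearOrder β] [LinearOrder γ]
    (xs : List (β × γ)) (hn : (xs.map Prod.fst).Nodup) :
    PySem.List.sorted2 xs Prod.fst Prod.snd = PySem.List.sorted xs Prod.fst := by
  rw [PySem.List.sorted_eq_foldl_insertBy]
  simp only [PySem.List.sorted2, if_neg (by decide : ¬ (false = true))]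
  apply pv_foldl_insertBy_congr _ _ xs xs [] (fun a ha => ha) (by simp)
  intro a ha b hb
  by_cases hab : a.1 = b.1
  · have : a = b := List.inj_on_of_nodup_map hn ha hb hab
    subst this
    simp
  · rcases lt_or_gt_of_ne hab with h1 | h1
    · simp [h1]
    · simp [h1, not_lt_of_gt h1]

-- A's reverse_seed_map in closed form: position of seed k+1 in the bracket order
theorem pv_rmap_eq (s : Int) :
    reverse_seed_map s
      = (List.range (seed_order s).length).map
          (fun (k : Nat) => (((seed_order s).idxOf ((k : Int) + 1) : Nat) : Int)) := by
  have hlenr : (PySem.List.pyRange 0 ((seed_order s).length : Int) 1).length = (seed_order s).length := by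
    rw [PySem.List.length_pyRange_one]; omega
  have hfst : (((seed_order s).zip (PySem.List.pyRange 0 ((seed_order s).length : Int) 1)).map Prod.fst) = seed_order s :=
    List.map_fst_zip (by rw [hlenr])
  have htarget : PySem.List.sorted ((seed_order s).zip (PySem.List.pyRange 0 ((seed_order s).length : Int) 1)) Prod.fst
      = (List.range (seed_order s).length).map
          (fun (k : Nat) => (((k : Int) + 1, (((seed_order s).idxOf ((k : Int) + 1) : Nat) : Int)) : Int × Int)) := by
    apply PySem.List.sorted_eq_of_perm_of_pairwise_lt
    · -- permutation
      have e1 : (List.range (seed_order s).length).map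
            (fun (k : Nat) => (((k : Int) + 1, (((seed_order s).idxOf ((k : Int) + 1) : Nat) : Int)) : Int × Int))
          = ((List.range (seed_order s).length).map (fun (k : Nat) => (seed_order s).idxOf ((k : Int) + 1))).map
              (fun (i : Nat) => (((seed_order s).getD i 1, (i : Int)) : Int × Int)) := by
        rw [List.map_map]
        apply List.map_congr_left
        intro k hk
        simp only [List.mem_range] at hk
        simp only [Function.comp_apply]
        rw [List.getD_eq_getElem _ _ (pv_sigma_lt s k hk), pv_getElem_sigma s k hk]
      have e2 : (List.range (seed_order s).length).map (fun (i : Nat) => (((seed_order s).getD i 1, (i : Int)) : Int × Int))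
          = (seed_order s).zip (PySem.List.pyRange 0 ((seed_order s).length : Int) 1) := by
        apply List.ext_getElem
        · simp [hlenr]
        · intro i hi hi'
          have hiN : i < (seed_order s).length := by simpa using hi
          rw [List.getElem_map, List.getElem_zip, List.getElem_range,
            List.getD_eq_getElem _ _ hiN, PySem.List.getElem_pyRange_one]
          simp
      rw [e1, ← e2]
      exact (pv_perm_sigma s).map _
    · -- strictly increasing first components
      rw [List.pairwise_map]
      exact List.pairwise_lt_range.imp (by intro a b hab; simp; omega)
  simp only [reverse_seed_map]
  rw [pv_sorted2_eq_sorted _ (by rw [hfst]; exact seed_order_nodup s), htarget, List.map_map]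
  rfl

-- the core equality for A's side, for an arbitrary already-resolved size argument n
theorem pv_core (seed_list : List String) (fill : String) (n : Int) :
    (PySem.List.sorted2
        ((reverse_seed_map n).zip
          (seed_list ++ (PySem.List.pyRange 0 (((reverse_seed_map n).length : Int) - (seed_list.length : Int)) 1).map (fun _i => fill)))
        Prod.fst Prod.snd).map Prod.snd
      = (seed_order n).map
          (fun j => if j - 1 < (seed_list.length : Int) then PySem.List.pyGetD seed_list (j - 1) fill else fill) := by
  have hrm := pv_rmap_eq n
  have hrmlen : (reverse_seed_map n).length = (seed_order n).length := by rw [hrm]; simp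
  set N := (seed_order n).length with hN
  set m := seed_list.length with hm
  set fl := (PySem.List.pyRange 0 (((reverse_seed_map n).length : Int) - (m : Int)) 1).map (fun _i => fill) with hflDef
  have hfl : fl.length = ((N : Int) - (m : Int)).toNat := by
    rw [hflDef, List.length_map, PySem.List.length_pyRange_one, hrmlen]; omega
  have hfilledlen : (seed_list ++ fl).length = m + ((N : Int) - (m : Int)).toNat := by
    rw [List.length_append, hfl]
  have hfge : N ≤ (seed_list ++ fl).length := by rw [hfilledlen]; omega
  have hziplen : ((reverse_seed_map n).zip (seed_list ++ fl)).length = N := by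
    rw [List.length_zip, hrmlen]; omega
  have hnodup_rmap : (reverse_seed_map n).Nodup := by
    rw [hrm]
    have h1 : ((List.range N).map (fun (k : Nat) => (seed_order n).idxOf ((k : Int) + 1))).Nodup :=
      (pv_perm_sigma n).nodup_iff.2 List.nodup_range
    have h2 := List.Nodup.map (f := fun (x : Nat) => (x : Int)) (fun a b h => by simpa using h) h1
    rwa [List.map_map] at h2
  have hfst2 : (((reverse_seed_map n).zip (seed_list ++ fl)).map Prod.fst) = reverse_seed_map n :=
    List.map_fst_zip (by rw [hrmlen]; exact hfge)
  have htarget2 : PySem.List.sorted ((reverse_seed_map n).zip (seed_list ++ fl)) Prod.fst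
      = (List.range N).map
          (fun (i : Nat) => (((i : Int), (seed_list ++ fl).getD (((seed_order n).getD i 1 - 1).toNat) "") : Int × String)) := by
    apply PySem.List.sorted_eq_of_perm_of_pairwise_lt
    · have e1 : (reverse_seed_map n).zip (seed_list ++ fl)
          = (List.range N).map
              (fun (k : Nat) => (((((seed_order n).idxOf ((k : Int) + 1) : Nat) : Int), (seed_list ++ fl).getD k "") : Int × String)) := by
        apply List.ext_getElem
        · rw [hziplen, List.length_map, List.length_range]
        · intro i hi hi'
          have hiN : i < N := by rwa [hziplen] at hi
          rw [List.getElem_zip, List.getElem_map, List.getElem_range]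
          congr 1
          · rw [List.getElem_of_eq hrm, List.getElem_map, List.getElem_range]
          · rw [List.getD_eq_getElem _ _ (by omega : i < (seed_list ++ fl).length)]
      have e2 : (List.range N).map
              (fun (k : Nat) => (((((seed_order n).idxOf ((k : Int) + 1) : Nat) : Int), (seed_list ++ fl).getD k "") : Int × String))
          = ((List.range N).map (fun (k : Nat) => (seed_order n).idxOf ((k : Int) + 1))).map
              (fun (i : Nat) => (((i : Int), (seed_list ++ fl).getD (((seed_order n).getD i 1 - 1).toNat) "") : Int × String)) := by
        rw [List.map_map]
        apply List.map_congr_left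
        intro k hk
        simp only [List.mem_range] at hk
        simp only [Function.comp_apply]
        congr 2
        rw [List.getD_eq_getElem _ _ (pv_sigma_lt n k hk), pv_getElem_sigma n k hk]
        omega
      rw [e1, e2]
      exact ((pv_perm_sigma n).map _).symm
    · rw [List.pairwise_map]
      exact List.pairwise_lt_range.imp (by intro a b hab; simp; omega)
  rw [pv_sorted2_eq_sorted _ (by rw [hfst2]; exact hnodup_rmap), htarget2, List.map_map]
  apply List.ext_getElem
  · simp [hN]
  · intro i hi hi'
    have hiN : i < N := by simpa using hi
    have hiL : i < (seed_order n).length := by rw [← hN]; exact hiN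
    rw [List.getElem_map, List.getElem_range, List.getElem_map]
    simp only [Function.comp_apply]
    have hb := (seed_order_mem n _).1 (List.getElem_mem hiL)
    rw [List.getD_eq_getElem (seed_order n) 1 hiL]
    by_cases hk : (seed_order n)[i] - 1 < (m : Int)
    · rw [if_pos hk]
      have hklt : ((seed_order n)[i] - 1).toNat < m := by omega
      rw [List.getD_append _ _ _ _ hklt, List.getD_eq_getElem _ _ hklt,
        PySem.List.pyGetD_eq_getElem seed_list fill (by omega) (by rw [← hm]; omega)]
    · rw [if_neg hk]
      have hmk : m ≤ ((seed_order n)[i] - 1).toNat := by omega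
      rw [List.getD_append_right _ _ _ _ hmk,
        List.getD_eq_getElem _ _ (by rw [hfl]; omega : ((seed_order n)[i] - 1).toNat - m < fl.length)]
      rw [List.getElem_of_eq hflDef, List.getElem_map]

-- ---- B-side: pvPlace computes (seed_order n).map ----

-- iterate pvExpand, innermost application first (matches one loop unfolding)
def pvIter : Nat → List Int → List Int
  | 0, o => o
  | k + 1, o => pvIter k (pvExpand o)

theorem pvIter_succ_out (k : Nat) (o : List Int) : pvIter (k + 1) o = pvExpand (pvIter k o) := by
  induction k generalizing o with
  | zero => rfl
  | succ k ih => rw [pvIter, ih, pvIter]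

theorem pvExpand_flatMap (o : List Int) :
    pvExpand o = o.flatMap (fun j => [j, (2 * (o.length : Int) + 1) - j]) := by
  rw [pvExpand, PySem.List.foldl_append_eq_flatMap, List.nil_append]

theorem pvIter_one_length (k : Nat) : (pvIter k [1]).length = 2 ^ k := by
  induction k with
  | zero => rfl
  | succ k ih =>
      rw [pvIter_succ_out, pvExpand, pv_expand_length, ih]
      ring

-- A's loop equals pvDepth-many iterations of the body
theorem pv_loop_eq_iter (size : Int) (order : List Int) (h : 0 < order.length) :
    pvSeedLoop size order h = pvIter (pvDepth size (order.length : Int) (by exact_mod_cast h)) order := by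
  fun_induction pvSeedLoop size order h with
  | case1 order h hl ih =>
      have hlen : ((pvExpand order).length : Int) = 2 * (order.length : Int) := by
        rw [pvExpand, pv_expand_length]; push_cast; ring
      rw [pvDepth, if_neg (by omega), Nat.add_comm 1, ih]
      simp only [pvIter, hlen]
  | case2 order h hl =>
      rw [pvDepth, if_pos (by omega), pvIter]

-- B's recursion: pvPlace k f flat-maps f over the order of size 2^k
theorem pv_flatMap_flatMap {α β γ : Type} (l : List α) (f : α → List β) (g : β → List γ) :
    (l.flatMap f).flatMap g = l.flatMap (fun x => (f x).flatMap g) := by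
  induction l with
  | nil => rfl
  | cons x xs ih => simp [List.flatMap_cons, ih]

theorem pv_place_eq_flatMap (k : Nat) (f : Int → List String) :
    pvPlace k f = (pvIter k [1]).flatMap f := by
  induction k generalizing f with
  | zero =>
      show f 1 = List.flatMap f [1]
      simp [List.flatMap_cons]
  | succ k ih =>
      rw [pvPlace, ih, pvIter_succ_out, pvExpand_flatMap, pv_flatMap_flatMap,
        pvIter_one_length]
      apply List.flatMap_congr  -- pointwise equality of the flat-mapped functions
      intro j _
      rw [List.flatMap_cons, List.flatMap_cons, List.flatMap_nil, List.append_nil]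
      congr 2
      push_cast
      ring

theorem pv_flatMap_single {α β : Type} (l : List α) (g : α → β) :
    l.flatMap (fun x => [g x]) = l.map g := by
  induction l with
  | nil => rfl
  | cons x xs ih => rw [List.flatMap_cons, ih]; rfl

-- ===== VERDICT (by name: the statement is the Claim_ definition above) =====
theorem seeds_to_sequential_spec : Claim_equal_seeds_to_sequential := by
  intro seed_list size fill _
  unfold Spec_seeds_to_sequential seeds_to_sequential seeds_to_sequential_alt
  have key : ∀ n : Int,
      pvPlace (pvDepth n 1 (by norm_num))
        (fun j => [if j - 1 < (seed_list.length : Int) then PySem.List.pyGetD seed_list (j - 1) fill else fill])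
      = (seed_order n).map
        (fun j => if j - 1 < (seed_list.length : Int) then PySem.List.pyGetD seed_list (j - 1) fill else fill) := by
    intro n
    rw [pv_place_eq_flatMap, pv_flatMap_single, seed_order, pv_loop_eq_iter]
    norm_num
  cases size with
  | none => rw [key, pv_core seed_list fill _]
  | some s => rw [key, pv_core seed_list fill s]
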